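-- pv_equiv track=rewrite | github.com/IshanMadusanka13/AgriVision | server/app/routes/disease_router.py | get_overall_severity
-- ===== SOURCE A (Python) =====
-- def get_overall_severity(detections: list) -> str:
--     """Determine overall severity based on all detections"""
--     if not detections:
--         return "None"
--
--     severity_scores = []
--     for detection in detections:
--         disease = detection["disease"]
--         severity_scores.append(get_disease_severity_level(disease))
--
--     # Return highest severity found
--     if "High" in severity_scores:
--         return "High"
--     elif "Moderate" in severity_scores:
--         return "Moderate"
--     elif "Low" in severity_scores:
--         return "Low"
--     else:
--         return "None"
--
-- def get_disease_severity_level(disease_name: str) -> str: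
--     """Determine severity level for a disease"""
--     severe_diseases = ["bacterial_leaf_spot", "cercospora_leaf_spot"]
--     moderate_diseases = ["leaf_curl", "powdery_mildew"]
--
--     disease_lower = (disease_name or "").lower().replace(" ", "_")
--
--     if any(severe in disease_lower for severe in severe_diseases):
--         return "High"
--     elif any(moderate in disease_lower for moderate in moderate_diseases):
--         return "Moderate"
--     elif "healthy" in disease_lower or "nothing" in disease_lower:
--         return "None"
--     else:
--         return "Low"
-- ===== SOURCE B (Python) =====
-- def get_disease_severity_level(disease_name: str) -> str:
--     """Determine severity level for a disease"""
--     severe_diseases = ["bacterial_leaf_spot", "cercospora_leaf_spot"]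
--     moderate_diseases = ["leaf_curl", "powdery_mildew"]
--     disease_lower = (disease_name or "").lower().replace(" ", "_")
--     if any(severe in disease_lower for severe in severe_diseases):
--         return "High"
--     elif any(moderate in disease_lower for moderate in moderate_diseases):
--         return "Moderate"
--     elif "healthy" in disease_lower or "nothing" in disease_lower:
--         return "None"
--     else:
--         return "Low"
--
-- _RANK = {"None": 0, "Low": 1, "Moderate": 2, "High": 3}
-- _NAMES = ["None", "Low", "Moderate", "High"]
--
-- def get_overall_severity(detections: list) -> str:
--     """Determine overall severity based on all detections"""
--     if not detections:
--         return "None"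
--     best = 0
--     for detection in detections:
--         best = max(best, _RANK[get_disease_severity_level(detection["disease"])])
--     return _NAMES[best]
-- ===== Notes on version B (the rewrite author's own statement) =====
-- stated objective: simpler
-- what changed: Instead of materialising a list of severity strings and scanning it up to three times for membership, B folds once over the detections keeping a single numeric best-rank (None=0..High=3) and maps it back to its string at the end.
import Mathlib
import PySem

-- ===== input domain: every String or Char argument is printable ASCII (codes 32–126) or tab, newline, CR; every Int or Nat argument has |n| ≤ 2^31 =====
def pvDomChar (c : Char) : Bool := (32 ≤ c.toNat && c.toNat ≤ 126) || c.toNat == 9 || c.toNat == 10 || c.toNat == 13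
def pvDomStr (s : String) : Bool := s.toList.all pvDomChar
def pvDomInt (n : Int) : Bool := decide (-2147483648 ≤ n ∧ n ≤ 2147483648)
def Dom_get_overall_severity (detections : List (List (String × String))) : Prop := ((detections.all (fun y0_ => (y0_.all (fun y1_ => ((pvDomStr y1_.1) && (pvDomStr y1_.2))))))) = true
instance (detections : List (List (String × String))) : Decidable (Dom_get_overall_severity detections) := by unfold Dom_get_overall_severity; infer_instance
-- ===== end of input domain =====

-- B changes only the selection strategy (one fold over a numeric rank instead of a score
-- list scanned three times); both share the helper get_disease_severity_level.

-- ===== PORT A =====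
-- shared helper, transliteration of get_disease_severity_level
def get_disease_severity_level (disease_name : String) : String :=
  let severe_diseases : List String := ["bacterial_leaf_spot", "cercospora_leaf_spot"]
  let moderate_diseases : List String := ["leaf_curl", "powdery_mildew"]
  -- (disease_name or "") equals disease_name for a str: "" is the only falsy str
  let disease_lower := PySem.Str.replace (PySem.Str.lower (if disease_name == "" then "" else disease_name)) " " "_"
  if severe_diseases.any (fun severe => PySem.Str.isIn severe disease_lower) then "High"
  else if moderate_diseases.any (fun moderate => PySem.Str.isIn moderate disease_lower) then "Moderate"
  else if PySem.Str.isIn "healthy" disease_lower || PySem.Str.isIn "nothing" disease_lower then "None"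
  else "Low"

-- detection["disease"]: first-match lookup; Pre_ guarantees the key is present (KeyError otherwise)
def pvLookupDisease (detection : List (String × String)) : String :=
  ((PySem.Dict.mk detection).get? "disease").getD ""

def get_overall_severity (detections : List (List (String × String))) : String :=
  if detections = [] then "None"
  else
    let severity_scores :=
      detections.foldl (fun acc detection => acc ++ [get_disease_severity_level (pvLookupDisease detection)]) []
    if severity_scores.contains "High" then "High"
    else if severity_scores.contains "Moderate" then "Moderate"
    else if severity_scores.contains "Low" then "Low"
    else "None"

-- ===== PORT B =====
-- _RANK = {"None": 0, "Low": 1, "Moderate": 2, "High": 3}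
def pvRank (s : String) : Nat :=
  PySem.Dict.getD (PySem.Dict.mk [("None", 0), ("Low", 1), ("Moderate", 2), ("High", 3)]) s 0

def get_overall_severity_alt (detections : List (List (String × String))) : String :=
  if detections = [] then "None"
  else
    let best :=
      detections.foldl (fun best detection => max best (pvRank (get_disease_severity_level (pvLookupDisease detection)))) 0
    ["None", "Low", "Moderate", "High"].getD best "None"

-- ===== PRECONDITION & SPEC =====
-- Pre_ excludes exactly the detections lacking the "disease" key, where A raises KeyError.
def Pre_get_overall_severity (detections : List (List (String × String))) : Prop :=
  ∀ det ∈ detections, "disease" ∈ det.map Prod.fst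
instance (detections : List (List (String × String))) : Decidable (Pre_get_overall_severity detections) := by unfold Pre_get_overall_severity; infer_instance
def pvWitness_get_overall_severity : (List (List (String × String))) := ([[("disease", "leaf_curl")]])
def Spec_get_overall_severity (detections : List (List (String × String))) (out : String) : Prop := out = get_overall_severity_alt detections
instance (detections : List (List (String × String))) (out : String) : Decidable (Spec_get_overall_severity detections out) := by unfold Spec_get_overall_severity; infer_instance

-- ===== CLAIM (what is proved, stated in full; the proofs are below) =====
def Claim_equal_get_overall_severity : Prop := ∀ (detections : List (List (String × String))), Dom_get_overall_severity detections → Pre_get_overall_severity detections → Spec_get_overall_severity detections (get_overall_severity detections)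

-- ===== LEMMAS AND PROOFS =====

-- the helper returns one of four literals
lemma sev_cases (s : String) :
    get_disease_severity_level s = "High" ∨ get_disease_severity_level s = "Moderate" ∨
    get_disease_severity_level s = "Low" ∨ get_disease_severity_level s = "None" := by
  simp only [get_disease_severity_level]
  split_ifs <;> simp

lemma rank_eq (s : String) :
    pvRank s = if "None" == s then 0 else if "Low" == s then 1 else if "Moderate" == s then 2
               else if "High" == s then 3 else 0 := by
  simp only [pvRank, PySem.Dict.getD_eq_get?_getD, PySem.Dict.get?_mk_cons]
  split_ifs <;> simp [PySem.Dict.get?]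

lemma pvRank_le (s : String) : pvRank s ≤ 3 := by
  rw [rank_eq]; split_ifs <;> omega

lemma foldl_append_map {α β : Type} (f : α → β) :
    ∀ (l : List α) (acc : List β),
      l.foldl (fun acc x => acc ++ [f x]) acc = acc ++ l.map f := by
  intro l
  induction l with
  | nil => simp
  | cons x xs ih => intro acc; simp [ih]

lemma foldl_max_mem : ∀ (l : List Nat) (a : Nat), l.foldl max a = a ∨ l.foldl max a ∈ l := by
  intro l
  induction l with
  | nil => simp
  | cons x xs ih =>
    intro a
    rcases ih (max a x) with h | h
    · rw [List.foldl_cons, h]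
      rcases max_choice a x with h' | h' <;> simp [h']
    · simp [List.foldl_cons, h]

lemma le_foldl_max : ∀ (l : List Nat) (a : Nat), a ≤ l.foldl max a := by
  intro l
  induction l with
  | nil => simp
  | cons x xs ih =>
    intro a
    exact le_trans (Nat.le_max_left a x) (ih (max a x))

lemma mem_le_foldl_max : ∀ (l : List Nat) (a x : Nat), x ∈ l → x ≤ l.foldl max a := by
  intro l
  induction l with
  | nil => simp
  | cons y ys ih =>
    intro a x hx
    rcases List.mem_cons.mp hx with rfl | hx
    · exact le_trans (Nat.le_max_right a x) (le_foldl_max ys _)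
    · exact ih _ x hx

-- ===== VERDICT (by name: the statement is the Claim_ definition above) =====
theorem get_overall_severity_spec : Claim_equal_get_overall_severity := by
  intro detections _dom _pre
  unfold Spec_get_overall_severity get_overall_severity get_overall_severity_alt
  by_cases hnil : detections = []
  · simp [hnil]
  · simp only [hnil, if_false]
    -- abbreviations
    set sev : List (String × String) → String :=
      fun det => get_disease_severity_level (pvLookupDisease det) with hsev
    have hscores :
        detections.foldl (fun acc detection => acc ++ [get_disease_severity_level (pvLookupDisease detection)]) []
          = detections.map sev := by
      rw [foldl_append_map]; simp [hsev]
    have hbest :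
        detections.foldl (fun best detection => max best (pvRank (get_disease_severity_level (pvLookupDisease detection)))) 0
          = ((detections.map sev).map pvRank).foldl max 0 := by
      rw [List.foldl_map, List.foldl_map]
    rw [hscores, hbest]
    set L := detections.map sev with hL
    set ranks := L.map pvRank with hranks
    set m := ranks.foldl max 0 with hm
    have hLmem : ∀ s ∈ L, s = "High" ∨ s = "Moderate" ∨ s = "Low" ∨ s = "None" := by
      intro s hs
      rcases List.mem_map.mp hs with ⟨det, _, rfl⟩
      exact sev_cases _
    have hm_mem : m = 0 ∨ m ∈ ranks := by rw [hm]; exact foldl_max_mem ranks 0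
    have hmle : m ≤ 3 := by
      rcases hm_mem with h | h
      · omega
      · rcases List.mem_map.mp h with ⟨s, _, hrs⟩
        rw [← hrs]; exact pvRank_le s
    -- membership in L pushes a rank into ranks
    have hpush : ∀ s ∈ L, pvRank s ≤ m := by
      intro s hs
      exact mem_le_foldl_max ranks 0 _ (List.mem_map.mpr ⟨s, hs, rfl⟩)
    -- if m ∈ ranks then some s ∈ L has that rank
    by_cases h3 : L.contains "High"
    · have h3' : ("High" : String) ∈ L := by simpa using h3
      have : (3 : Nat) ≤ m := by
        have := hpush _ h3'; rw [rank_eq] at this; simpa using this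
      have hm3 : m = 3 := by omega
      simp [h3', hm3]
    · have h3' : ("High" : String) ∉ L := by simpa using h3
      have hne3 : m ≠ 3 := by
        intro hm3
        rcases hm_mem with h | h
        · omega
        · rcases List.mem_map.mp h with ⟨s, hs, hrs⟩
          rcases hLmem s hs with rfl | rfl | rfl | rfl
          · exact h3' hs
          all_goals (simp [rank_eq] at hrs; omega)
      by_cases h2 : L.contains "Moderate"
      · have h2' : ("Moderate" : String) ∈ L := by simpa using h2
        have : (2 : Nat) ≤ m := by
          have := hpush _ h2'; simpa [rank_eq] using this
        have hm2 : m = 2 := by omega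
        simp [h3', h2', hm2]
      · have h2' : ("Moderate" : String) ∉ L := by simpa using h2
        have hne2 : m ≠ 2 := by
          intro hm2
          rcases hm_mem with h | h
          · omega
          · rcases List.mem_map.mp h with ⟨s, hs, hrs⟩
            rcases hLmem s hs with rfl | rfl | rfl | rfl
            · exact h3' hs
            · exact h2' hs
            all_goals (simp [rank_eq] at hrs; omega)
        by_cases h1 : L.contains "Low"
        · have h1' : ("Low" : String) ∈ L := by simpa using h1
          have : (1 : Nat) ≤ m := by
            have := hpush _ h1'; simpa [rank_eq] using this
          have hm1 : m = 1 := by omega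
          simp [h3', h2', h1', hm1]
        · have h1' : ("Low" : String) ∉ L := by simpa using h1
          have hm0 : m = 0 := by
            rcases hm_mem with h | h
            · exact h
            · rcases List.mem_map.mp h with ⟨s, hs, hrs⟩
              rcases hLmem s hs with rfl | rfl | rfl | rfl
              · exact absurd hs h3'
              · exact absurd hs h2'
              · exact absurd hs h1'
              · simp [rank_eq] at hrs; omega
          simp [h3', h2', h1', hm0]
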